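-- pv_equiv track=rewrite | github.com/jocarmp08/Tutoria-IC1802 | Semana #7/2016106261_Examen01.py | funcion_nozero
-- ===== SOURCE A (Python) =====
-- def funcion_nozero(numero, potencia):
--     '''
--
--     Se compone un nuevo número, basado en el número de entrada, que no contiene
--     ceros para ser retornado para su valoración.
--
--     '''
--     if numero == 0:
--         return 0
--     else:
--         lastdigit = numero % 10
--         if lastdigit == 0:
--             return funcion_nozero(numero // 10, potencia)
--         else:
--             return lastdigit * (10 ** potencia) + funcion_nozero(numero // 10,
--                                                                  potencia + 1)
-- ===== SOURCE B (Python) =====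
-- def funcion_nozero(numero, potencia):
--     result = 0
--     while numero != 0:
--         lastdigit = numero % 10
--         if lastdigit != 0:
--             result += lastdigit * (10 ** potencia)
--             potencia += 1
--         numero //= 10
--     return result
-- ===== Notes on version B (the rewrite author's own statement) =====
-- stated objective: alternative
-- what changed: Replaces A's digit-by-digit recursion with an explicit while-loop that threads (result, potencia) through an accumulator instead of the call stack.
import Mathlib
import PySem

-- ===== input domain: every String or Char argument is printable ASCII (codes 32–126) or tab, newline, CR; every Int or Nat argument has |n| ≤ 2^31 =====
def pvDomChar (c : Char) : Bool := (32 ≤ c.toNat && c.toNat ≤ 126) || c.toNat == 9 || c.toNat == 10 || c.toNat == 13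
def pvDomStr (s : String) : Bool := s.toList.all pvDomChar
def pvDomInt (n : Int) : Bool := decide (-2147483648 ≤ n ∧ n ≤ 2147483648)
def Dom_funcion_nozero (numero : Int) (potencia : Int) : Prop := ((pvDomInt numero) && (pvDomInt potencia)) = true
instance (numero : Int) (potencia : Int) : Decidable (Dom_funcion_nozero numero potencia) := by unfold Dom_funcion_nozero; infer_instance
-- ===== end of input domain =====

-- B rewrites A's digit recursion as an explicit accumulator loop (same cost, different decomposition).

-- ===== PORT A =====
-- Literal port of A's recursion. The `numero < 0` guard only makes the Lean function
-- total: on negative numero the Python A never terminates (RecursionError), outside Pre_.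
-- `10 ** potencia` is `10 ^ potencia.toNat`: exact for 0 ≤ potencia (Pre_); for negative
-- potencia Python yields a float, outside Pre_.
def funcion_nozero (numero : Int) (potencia : Int) : Int :=
  if numero = 0 then 0
  else if numero < 0 then 0
  else
    let lastdigit := PySem.Int.mod numero 10
    if lastdigit = 0 then funcion_nozero (PySem.Int.floordiv numero 10) potencia
    else lastdigit * 10 ^ potencia.toNat + funcion_nozero (PySem.Int.floordiv numero 10) (potencia + 1)
termination_by numero.toNat
decreasing_by
  all_goals
    rename_i h0 hneg
    rw [PySem.Int.floordiv_eq_ediv_of_pos (by omega)]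
    omega

-- ===== PORT B =====
-- Source B's while-loop over nonnegative numero, as recursion on the Nat value of numero
-- (identical to the Python int for 0 ≤ numero, which Pre_ guarantees; on negative
-- numero the Python loop never terminates).
def funcion_nozero_altLoop (numero : Nat) (potencia : Int) (result : Int) : Int :=
  if numero = 0 then result
  else
    let lastdigit : Int := (numero % 10 : Nat)
    if lastdigit ≠ 0 then
      funcion_nozero_altLoop (numero / 10) (potencia + 1) (result + lastdigit * 10 ^ potencia.toNat)
    else
      funcion_nozero_altLoop (numero / 10) potencia result
termination_by numero
decreasing_by all_goals omega

def funcion_nozero_alt (numero : Int) (potencia : Int) : Int :=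
  funcion_nozero_altLoop numero.toNat potencia 0

-- ===== PRECONDITION & SPEC =====
-- Pre_ excludes numero < 0 (A raises RecursionError, B's loop does not terminate) and
-- potencia < 0 with numero ≠ 0 (A returns a float, not a value of the declared int type).
def Pre_funcion_nozero (numero : Int) (potencia : Int) : Prop :=
  0 ≤ numero ∧ (0 ≤ potencia ∨ numero = 0)
instance (numero : Int) (potencia : Int) : Decidable (Pre_funcion_nozero numero potencia) := by
  unfold Pre_funcion_nozero; infer_instance

def pvWitness_funcion_nozero : Int × Int := (105, 0)

def Spec_funcion_nozero (numero : Int) (potencia : Int) (out : Int) : Prop :=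
  out = funcion_nozero_alt numero potencia
instance (numero : Int) (potencia : Int) (out : Int) : Decidable (Spec_funcion_nozero numero potencia out) := by
  unfold Spec_funcion_nozero; infer_instance

-- ===== CLAIM (what is proved, stated in full; the proofs are below) =====
def Claim_equal_funcion_nozero : Prop := ∀ (numero : Int) (potencia : Int), Dom_funcion_nozero numero potencia → Pre_funcion_nozero numero potencia → Spec_funcion_nozero numero potencia (funcion_nozero numero potencia)

-- ===== LEMMAS AND PROOFS =====

-- Loop invariant: the accumulator loop adds A's value for the remaining digits.
theorem funcion_nozero_altLoop_eq (n : Nat) (p result : Int) :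
    funcion_nozero_altLoop n p result = result + funcion_nozero (n : Int) p := by
  induction n using Nat.strong_induction_on generalizing p result with
  | _ n ih =>
    rcases Nat.eq_zero_or_pos n with h0 | hpos
    · subst h0
      simp [funcion_nozero_altLoop, funcion_nozero]
    · rw [funcion_nozero_altLoop, funcion_nozero]
      have hn0 : (n : Int) ≠ 0 := by exact_mod_cast Nat.pos_iff_ne_zero.mp hpos
      have hn0' : n ≠ 0 := Nat.pos_iff_ne_zero.mp hpos
      have hnneg : ¬ ((n : Int) < 0) := by omega
      have hmod : PySem.Int.mod (n : Int) 10 = ((n % 10 : Nat) : Int) :=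
        PySem.Int.mod_natCast n 10
      have hdiv : PySem.Int.floordiv (n : Int) 10 = ((n / 10 : Nat) : Int) :=
        PySem.Int.floordiv_natCast n 10
      have hlt : n / 10 < n := Nat.div_lt_self hpos (by omega)
      simp only [if_neg hn0', if_neg hn0, if_neg hnneg, hmod, hdiv]
      by_cases hd : ((n % 10 : Nat) : Int) = 0
      · simp [hd, ih _ hlt]
      · simp [ih _ hlt]
        split_ifs <;> ring

-- ===== VERDICT (by name: the statement is the Claim_ definition above) =====
theorem funcion_nozero_spec : Claim_equal_funcion_nozero := by
  intro numero potencia _ hpre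
  unfold Spec_funcion_nozero funcion_nozero_alt
  have h : ((numero.toNat : Int)) = numero := Int.toNat_of_nonneg hpre.1
  rw [funcion_nozero_altLoop_eq, h, zero_add]
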